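-- pv_equiv track=rewrite | github.com/sivagirish81/HorizonRev | apps/hf_space_app.py | _decode_action_bundle
-- ===== SOURCE A (Python) =====
-- def _decode_action_bundle(action: int, actions_per_month: int, primitive_actions: int) -> list[int]:
--     if action < primitive_actions or actions_per_month <= 1:
--         return [action]
--     bundle_index = action - primitive_actions
--     out: list[int] = []
--     for power in range(actions_per_month - 1, -1, -1):
--         base = primitive_actions**power
--         token = bundle_index // base
--         bundle_index %= base
--         out.append(int(token))
--     return out
-- ===== SOURCE B (Python) =====
-- def _decode_action_bundle(action: int, actions_per_month: int, primitive_actions: int) -> list[int]: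
--     if action < primitive_actions or actions_per_month <= 1:
--         return [action]
--     b = primitive_actions
--     idx = action - primitive_actions
--     digits: list[int] = []
--     for _ in range(actions_per_month - 1):
--         digits.append(idx % b)
--         idx //= b
--     digits.append(idx)
--     digits.reverse()
--     return digits
-- ===== Notes on version B (the rewrite author's own statement) =====
-- stated objective: alternative
-- what changed: Decodes least-significant digit first with repeated %/// by the base and one final un-modded leftover, then reverses, instead of A's most-significant-first scan that recomputes primitive_actions**power and floor-divides by it at every step.
-- outside the precondition, e.g. on _decode_action_bundle(260, 5, -30): A returns [0, -1, -30, -10, -10], B returns [0, 0, 0, -10, -10]; on _decode_action_bundle(5, 2, 0): A raises ZeroDivisionError, B raises ZeroDivisionError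
import Mathlib
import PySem

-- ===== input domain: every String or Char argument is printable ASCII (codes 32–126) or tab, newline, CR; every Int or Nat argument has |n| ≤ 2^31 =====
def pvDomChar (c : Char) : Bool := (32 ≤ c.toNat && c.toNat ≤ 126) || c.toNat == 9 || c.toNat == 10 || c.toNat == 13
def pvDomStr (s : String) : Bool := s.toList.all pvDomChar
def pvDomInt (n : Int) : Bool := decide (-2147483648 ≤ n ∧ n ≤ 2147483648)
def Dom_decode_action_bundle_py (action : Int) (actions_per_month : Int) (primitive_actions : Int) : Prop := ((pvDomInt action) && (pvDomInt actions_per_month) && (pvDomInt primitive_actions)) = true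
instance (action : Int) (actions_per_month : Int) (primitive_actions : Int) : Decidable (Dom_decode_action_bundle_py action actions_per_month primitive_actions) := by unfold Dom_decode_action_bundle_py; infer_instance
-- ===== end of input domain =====

-- B decodes least-significant digit first with repeated %// by the base (final leftover un-modded),
-- then reverses, instead of A's most-significant-first scan recomputing primitive_actions**power each step.

-- ===== PORT A =====
-- for power in range(actions_per_month-1, -1, -1): base = p**power; token = bi//base; bi %= base; out.append(token)
def pvALoop (p : Int) : Nat → Int → List Int → List Int
  | power, bi, out =>
    let base : Int := p ^ power
    let token := PySem.Int.floordiv bi base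
    let bi' := PySem.Int.mod bi base
    match power with
    | 0 => out ++ [token]
    | k + 1 => pvALoop p k bi' (out ++ [token])

def decode_action_bundle_py (action : Int) (actions_per_month : Int) (primitive_actions : Int) : List Int :=
  if action < primitive_actions ∨ actions_per_month ≤ 1 then [action]
  else pvALoop primitive_actions (actions_per_month - 1).toNat (action - primitive_actions) []

-- ===== PORT B =====
-- for _ in range(actions_per_month-1): digits.append(idx % b); idx //= b
def pvBLoop (p : Int) : Nat → Int → List Int → Int × List Int
  | 0, idx, digits => (idx, digits)
  | k + 1, idx, digits => pvBLoop p k (PySem.Int.floordiv idx p) (digits ++ [PySem.Int.mod idx p])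

def decode_action_bundle_py_alt (action : Int) (actions_per_month : Int) (primitive_actions : Int) : List Int :=
  if action < primitive_actions ∨ actions_per_month ≤ 1 then [action]
  else
    let r := pvBLoop primitive_actions (actions_per_month - 1).toNat (action - primitive_actions) []
    (r.2 ++ [r.1]).reverse

-- ===== PRECONDITION & SPEC =====
-- Pre_ excludes non-positive primitive_actions when the loop actually runs: with primitive_actions = 0
-- A raises ZeroDivisionError (B too), and with a negative base both programs' "digit" outputs are
-- accidental artefacts of a meaningless negative-base decomposition, neither being specified.
def Pre_decode_action_bundle_py (action : Int) (actions_per_month : Int) (primitive_actions : Int) : Prop :=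
  action < primitive_actions ∨ actions_per_month ≤ 1 ∨ 1 ≤ primitive_actions
instance (action : Int) (actions_per_month : Int) (primitive_actions : Int) : Decidable (Pre_decode_action_bundle_py action actions_per_month primitive_actions) := by unfold Pre_decode_action_bundle_py; infer_instance

def pvWitness_decode_action_bundle_py : Int × Int × Int := (17, 3, 4)

def Spec_decode_action_bundle_py (action : Int) (actions_per_month : Int) (primitive_actions : Int) (out : List Int) : Prop := out = decode_action_bundle_py_alt action actions_per_month primitive_actions
instance (action : Int) (actions_per_month : Int) (primitive_actions : Int) (out : List Int) : Decidable (Spec_decode_action_bundle_py action actions_per_month primitive_actions out) := by unfold Spec_decode_action_bundle_py; infer_instance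

-- ===== CLAIM (what is proved, stated in full; the proofs are below) =====
def Claim_equal_decode_action_bundle_py : Prop := ∀ (action : Int) (actions_per_month : Int) (primitive_actions : Int), Dom_decode_action_bundle_py action actions_per_month primitive_actions → Pre_decode_action_bundle_py action actions_per_month primitive_actions → Spec_decode_action_bundle_py action actions_per_month primitive_actions (decode_action_bundle_py action actions_per_month primitive_actions)

-- ===== LEMMAS AND PROOFS =====

theorem pvALoop_acc (p : Int) (k : Nat) (bi : Int) (out : List Int) :
    pvALoop p k bi out = out ++ pvALoop p k bi [] := by
  induction k generalizing bi out with
  | zero => simp [pvALoop]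
  | succ k ih =>
    rw [pvALoop]
    conv_rhs => rw [pvALoop]
    rw [ih]
    conv_rhs => rw [List.nil_append, ih]
    simp

theorem pvBLoop_acc (p : Int) (k : Nat) (idx : Int) (ds : List Int) :
    pvBLoop p k idx ds = ((pvBLoop p k idx []).1, ds ++ (pvBLoop p k idx []).2) := by
  induction k generalizing idx ds with
  | zero => simp [pvBLoop]
  | succ k ih =>
    rw [pvBLoop]
    conv_rhs => rw [pvBLoop]
    rw [ih]
    conv_rhs => rw [List.nil_append, ih]
    simp

theorem pv_emod_mul_ediv (a p q : Int) (hp : 0 < p) : (a % (p * q)) / p = (a / p) % q := by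
  rw [Int.emod_def, ← Int.ediv_ediv_of_nonneg hp.le]
  have h : a - p * q * (a / p / q) = a + (-(q * (a / p / q))) * p := by ring
  rw [h, Int.add_mul_ediv_right _ _ (by omega : p ≠ 0), Int.emod_def]
  ring

-- A's step peeled on the least-significant side
theorem pvALoop_peel (p : Int) (hp : 0 < p) (k : Nat) (idx : Int) :
    pvALoop p (k + 1) idx [] =
      pvALoop p k (PySem.Int.floordiv idx p) [] ++ [PySem.Int.mod idx p] := by
  induction k generalizing idx with
  | zero =>
    simp [pvALoop, pow_succ, pow_zero, PySem.Int.floordiv_eq_ediv_of_pos hp,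
      PySem.Int.mod_eq_emod_of_pos hp]
  | succ k ih =>
    have hq : (0:Int) < p ^ (k + 1) := pow_pos hp _
    have hpq : (0:Int) < p ^ (k + 2) := pow_pos hp _
    rw [pvALoop, pvALoop_acc]
    conv_rhs => rw [pvALoop, pvALoop_acc]
    simp only [List.nil_append]
    rw [ih]
    simp only [PySem.Int.floordiv_eq_ediv_of_pos hq, PySem.Int.floordiv_eq_ediv_of_pos hpq,
      PySem.Int.floordiv_eq_ediv_of_pos hp, PySem.Int.mod_eq_emod_of_pos hq,
      PySem.Int.mod_eq_emod_of_pos hpq, PySem.Int.mod_eq_emod_of_pos hp]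
    have hpow : (p : Int) ^ (k + 2) = p * p ^ (k + 1) := by ring
    rw [hpow, ← Int.ediv_ediv_of_nonneg hp.le, pv_emod_mul_ediv _ _ _ hp,
      Int.mod_mul_right_mod]
    simp

theorem pv_main (p : Int) (hp : 0 < p) (k : Nat) (idx : Int) :
    pvALoop p k idx [] = ((pvBLoop p k idx []).2 ++ [(pvBLoop p k idx []).1]).reverse := by
  induction k generalizing idx with
  | zero => simp [pvALoop, pvBLoop]
  | succ k ih =>
    rw [pvALoop_peel p hp, ih]
    conv_rhs => rw [pvBLoop]
    rw [pvBLoop_acc p (k := k) (PySem.Int.floordiv idx p) ([] ++ [PySem.Int.mod idx p])]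
    simp

-- ===== VERDICT (by name: the statement is the Claim_ definition above) =====
theorem decode_action_bundle_py_spec : Claim_equal_decode_action_bundle_py := by
  intro action aam p _hdom hpre
  unfold Spec_decode_action_bundle_py decode_action_bundle_py decode_action_bundle_py_alt
  by_cases hg : action < p ∨ aam ≤ 1
  · simp [hg]
  · have hp : (0:Int) < p := by
      rcases hpre with h | h | h
      · exact absurd (Or.inl h) hg
      · exact absurd (Or.inr h) hg
      · omega
    simp only [if_neg hg]
    exact pv_main p hp _ _
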